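-- pv_equiv track=rewrite | github.com/aorursy/new-nb-4 | leflal_cipher-3-solution.py | hide_ok_nok
-- ===== SOURCE A (Python) =====
-- def hide_ok_nok(x,pt = True, hide_ok = True):
--     pt_w = x['pt']
--     c_w = x['c']
--     if pt:
--         res = pt_w
--     else:
--         res = c_w
--     ok_i = set([i for i,(a,b) in enumerate(zip(pt_w,c_w)) if (ord(a) ^ ord(b) == 0)])
--     if hide_ok:
--         return(''.join(['.' if i in ok_i else res[i] for i in range(len(pt_w))]))
--     else:
--         return(''.join(['.' if i not in ok_i else res[i] for i in range(len(pt_w))]))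
-- ===== SOURCE B (Python) =====
-- def hide_ok_nok(x, pt=True, hide_ok=True):
--     pt_w = x['pt']
--     c_w = x['c']
--     # Phase 1: walk the character PAIRS directly (no indices, no set): a position
--     # is masked exactly when (a == b) agrees with hide_ok.
--     body = ''.join('.' if (a == b) == hide_ok else (a if pt else b)
--                    for a, b in zip(pt_w, c_w))
--     # Phase 2: the surplus of pt_w beyond c_w never matches, so it is handled in
--     # closed form: all dots when hide_ok is False, else the tail of res.
--     n_tail = len(pt_w) - len(c_w)
--     if n_tail <= 0:
--         return body
--     if not hide_ok:
--         return body + '.' * n_tail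
--     res = pt_w if pt else c_w
--     return body + res[len(c_w):len(pt_w)]
-- ===== Notes on version B (the rewrite author's own statement) =====
-- stated objective: alternative
-- what changed: Replaces the index loop over range(len(pt_w)) plus a precomputed set of matching indices with an index-free traversal of the zipped character pairs, and handles the surplus of pt_w beyond c_w (which can never match) in closed form as a slice or a run of dots.
-- outside the precondition, e.g. on hide_ok_nok({'pt': 'ab'}, True, True): A raises KeyError, B raises KeyError; on hide_ok_nok({'pt': 'ab', 'c': 'a'}, False, True): A raises IndexError, B returns '.'
import Mathlib
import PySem

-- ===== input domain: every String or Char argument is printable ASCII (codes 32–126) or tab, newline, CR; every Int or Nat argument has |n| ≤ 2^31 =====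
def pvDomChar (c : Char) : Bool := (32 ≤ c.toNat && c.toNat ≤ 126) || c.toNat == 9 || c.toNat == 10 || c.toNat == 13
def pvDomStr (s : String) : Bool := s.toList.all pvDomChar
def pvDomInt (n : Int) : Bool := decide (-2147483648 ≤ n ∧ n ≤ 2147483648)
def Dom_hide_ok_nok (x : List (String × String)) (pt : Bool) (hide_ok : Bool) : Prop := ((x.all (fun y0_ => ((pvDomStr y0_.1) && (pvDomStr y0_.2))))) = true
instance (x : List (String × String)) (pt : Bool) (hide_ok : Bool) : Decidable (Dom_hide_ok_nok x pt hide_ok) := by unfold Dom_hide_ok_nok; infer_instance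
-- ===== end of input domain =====

-- B replaces A's index loop plus a precomputed set of matching indices with an index-free
-- traversal of the zipped character pairs and a closed-form surplus tail (objective: alternative).

-- ===== PORT A =====
def hide_ok_nok (x : List (String × String)) (pt : Bool) (hide_ok : Bool) : String :=
  let pt_w := ((List.lookup "pt" x).getD "").toList   -- x['pt']; KeyError (missing key) excluded by Pre_
  let c_w := ((List.lookup "c" x).getD "").toList     -- x['c']; KeyError (missing key) excluded by Pre_
  let res := if pt then pt_w else c_w
  let ok_i : PySem.Set Int := PySem.Set.ofList
    (((PySem.List.enumerate (pt_w.zip c_w) 0).filter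
        (fun p => Nat.xor p.2.1.toNat p.2.2.toNat == 0)).map (·.1))
  if hide_ok then
    String.ofList ((PySem.List.pyRange 0 pt_w.length 1).map (fun i =>
      if PySem.Set.contains ok_i i then '.' else PySem.List.pyGetD res i ' '))  -- res[i]; IndexError excluded by Pre_
  else
    String.ofList ((PySem.List.pyRange 0 pt_w.length 1).map (fun i =>
      if ¬ PySem.Set.contains ok_i i then '.' else PySem.List.pyGetD res i ' '))

-- ===== PORT B =====
def hide_ok_nok_alt (x : List (String × String)) (pt : Bool) (hide_ok : Bool) : String :=
  let pt_w := ((List.lookup "pt" x).getD "").toList   -- x['pt']; KeyError (missing key) excluded by Pre_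
  let c_w := ((List.lookup "c" x).getD "").toList     -- x['c']; KeyError (missing key) excluded by Pre_
  -- phase 1: the zipped character pairs, no indices
  let body := String.ofList ((pt_w.zip c_w).map (fun p =>
    if ((p.1 == p.2) == hide_ok) then '.' else if pt then p.1 else p.2))
  -- phase 2: the surplus of pt_w beyond c_w, in closed form
  let n_tail : Int := (pt_w.length : Int) - (c_w.length : Int)
  if n_tail ≤ 0 then body
  else if hide_ok = false then
    body ++ String.ofList (PySem.List.pyRepeat ['.'] n_tail)          -- '.' * n_tail
  else
    let res := if pt then pt_w else c_w
    body ++ String.ofList (PySem.List.slice res (some (c_w.length : Int)) (some (pt_w.length : Int)))  -- res[len(c_w):len(pt_w)]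

-- ===== PRECONDITION & SPEC =====
-- Pre_ excludes exactly the inputs where Python A raises: a missing 'pt' or 'c' key (KeyError), and
-- hide_ok=True with pt=False and c shorter than pt (res[i] IndexError).
def Pre_hide_ok_nok (x : List (String × String)) (pt : Bool) (hide_ok : Bool) : Prop :=
  (List.lookup "pt" x).isSome = true ∧ (List.lookup "c" x).isSome = true ∧
  (hide_ok = true → pt = false →
    ((List.lookup "pt" x).getD "").length ≤ ((List.lookup "c" x).getD "").length)
instance (x : List (String × String)) (pt : Bool) (hide_ok : Bool) : Decidable (Pre_hide_ok_nok x pt hide_ok) := by unfold Pre_hide_ok_nok; infer_instance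
def pvWitness_hide_ok_nok : (List (String × String)) × Bool × Bool := ([("pt", "abc"), ("c", "abd")], true, true)
def Spec_hide_ok_nok (x : List (String × String)) (pt : Bool) (hide_ok : Bool) (out : String) : Prop := out = hide_ok_nok_alt x pt hide_ok
instance (x : List (String × String)) (pt : Bool) (hide_ok : Bool) (out : String) : Decidable (Spec_hide_ok_nok x pt hide_ok out) := by unfold Spec_hide_ok_nok; infer_instance

-- ===== CLAIM (what is proved, stated in full; the proofs are below) =====
def Claim_equal_hide_ok_nok : Prop := ∀ (x : List (String × String)) (pt : Bool) (hide_ok : Bool), Dom_hide_ok_nok x pt hide_ok → Pre_hide_ok_nok x pt hide_ok → Spec_hide_ok_nok x pt hide_ok (hide_ok_nok x pt hide_ok)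

-- ===== LEMMAS AND PROOFS =====

-- membership in A's list of matching indices, characterised
lemma mem_okList (P C : List Char) (i : Int) :
    (i ∈ ((PySem.List.enumerate (P.zip C) 0).filter
        (fun p => Nat.xor p.2.1.toNat p.2.2.toNat == 0)).map (·.1)) ↔
    ∃ (k : Nat), i = (k : Int) ∧ k < P.length ∧ k < C.length ∧ P[k]? = C[k]? := by
  simp only [List.mem_map, List.mem_filter, PySem.List.mem_enumerate_iff]
  constructor
  · rintro ⟨p, ⟨⟨k, hk, rfl⟩, hpred⟩, rfl⟩
    have hkP : k < P.length := lt_of_lt_of_le hk (by simp)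
    have hkC : k < C.length := lt_of_lt_of_le hk (by simp)
    refine ⟨k, by simp, hkP, hkC, ?_⟩
    have hx : Nat.xor (P[k]'hkP).toNat (C[k]'hkC).toNat = 0 := by
      simpa [List.getElem_zip] using hpred
    have hPC : (P[k]'hkP) = (C[k]'hkC) := by
      have := Nat.xor_eq_zero_iff.mp hx
      exact Char.ext (by
        have : (P[k]'hkP).val.toNat = (C[k]'hkC).val.toNat := this
        exact UInt32.toNat_inj.mp this)
    rw [List.getElem?_eq_getElem hkP, List.getElem?_eq_getElem hkC, hPC]
  · rintro ⟨k, rfl, hP, hC, heq⟩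
    have hk : k < (P.zip C).length := by simp; omega
    have hPC : P[k]'hP = C[k]'hC := by
      rw [List.getElem?_eq_getElem hP, List.getElem?_eq_getElem hC] at heq
      exact Option.some_inj.mp heq
    refine ⟨(0 + (k : Int), (P.zip C)[k]'hk), ⟨⟨k, hk, rfl⟩, ?_⟩, by simp⟩
    simp only [List.getElem_zip, hPC, beq_iff_eq]
    exact Nat.xor_self _

-- A's set membership test equals the fused match condition, for 0 ≤ i < |P|
lemma contains_ok (P C : List Char) (i : Int) (h0 : 0 ≤ i) (h1 : i < (P.length : Int)) :
    PySem.Set.contains (PySem.Set.ofList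
      (((PySem.List.enumerate (P.zip C) 0).filter
          (fun p => Nat.xor p.2.1.toNat p.2.2.toNat == 0)).map (·.1))) i
    = (decide (i < (C.length : Int)) && (PySem.List.pyGetD P i ' ' == PySem.List.pyGetD C i ' ')) := by
  obtain ⟨n, rfl⟩ := Int.eq_ofNat_of_zero_le h0
  have hn : n < P.length := by exact_mod_cast h1
  have hmem : PySem.Set.contains (PySem.Set.ofList
      (((PySem.List.enumerate (P.zip C) 0).filter
          (fun p => Nat.xor p.2.1.toNat p.2.2.toNat == 0)).map (·.1))) (n : Int) = true
      ↔ (n < C.length ∧ P[n]? = C[n]?) := by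
    rw [PySem.Set.contains_iff, PySem.Set.mem_ofList, mem_okList]
    constructor
    · rintro ⟨k, hk, _, hC, he⟩
      have : k = n := by exact_mod_cast hk.symm
      subst this; exact ⟨hC, he⟩
    · rintro ⟨hC, he⟩; exact ⟨n, rfl, hn, hC, he⟩
  by_cases hC : n < C.length
  · have hB : (decide ((n : Int) < (C.length : Int)) && (PySem.List.pyGetD P (n : Int) ' ' == PySem.List.pyGetD C (n : Int) ' '))
        = (P[n]'hn == C[n]'hC) := by
      simp [PySem.List.pyGetD_natCast, List.getD_eq_getElem?_getD, List.getElem?_eq_getElem hn, hC]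
    rw [hB]
    rcases hb : (P[n]'hn == C[n]'hC) with _ | _
    · rw [← Bool.not_eq_true, hmem]
      simp only [beq_eq_false_iff_ne, ne_eq] at hb
      simp [List.getElem?_eq_getElem hn, List.getElem?_eq_getElem hC, hb]
    · rw [hmem]
      simp only [beq_iff_eq] at hb
      simp [List.getElem?_eq_getElem hn, hb, hC]
  · have hB : (decide ((n : Int) < (C.length : Int)) && (PySem.List.pyGetD P (n : Int) ' ' == PySem.List.pyGetD C (n : Int) ' ')) = false := by
      simp [hC]
    rw [hB, ← Bool.not_eq_true, hmem]
    intro h; exact hC h.1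

-- the fused index form of the output equals B's zip-plus-tail form
lemma fused_eq_alt (P C : List Char) (pt hide_ok : Bool)
    (hpre : hide_ok = true → pt = false → P.length ≤ C.length) :
    ((PySem.List.pyRange 0 P.length 1).map (fun i =>
      if (decide (i < (C.length : Int)) && (PySem.List.pyGetD P i ' ' == PySem.List.pyGetD C i ' ')) == hide_ok
      then '.' else PySem.List.pyGetD (if pt then P else C) i ' '))
    = (let body := (P.zip C).map (fun p =>
        if ((p.1 == p.2) == hide_ok) then '.' else if pt then p.1 else p.2)
       let n_tail : Int := (P.length : Int) - (C.length : Int)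
       if n_tail ≤ 0 then body
       else if hide_ok = false then body ++ PySem.List.pyRepeat ['.'] n_tail
       else body ++ PySem.List.slice (if pt then P else C) (some (C.length : Int)) (some (P.length : Int))) := by
  simp only []
  rw [PySem.List.pyRange_one]
  simp only [Int.sub_zero, Int.toNat_natCast, List.map_map]
  by_cases hnm : (P.length : Int) - (C.length : Int) ≤ 0
  · have hle : P.length ≤ C.length := by omega
    rw [if_pos hnm]
    apply List.ext_getElem
    · simp [Nat.min_eq_left hle]
    · intro k hka hkb
      simp only [List.length_map, List.length_range] at hka
      have hkP : k < P.length := hka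
      have hkC : k < C.length := lt_of_lt_of_le hkP hle
      by_cases hpt : pt = true <;>
        simp [hpt, List.getElem_zip, PySem.List.pyGetD_natCast, List.getD_eq_getElem?_getD,
          hkP, hkC]
  · have hmn : C.length < P.length := by omega
    rw [if_neg hnm]
    cases hho : hide_ok with
    | false =>
      rw [if_pos rfl, PySem.List.pyRepeat_singleton]
      apply List.ext_getElem
      · simp; omega
      · intro k hka hkb
        simp only [List.length_map, List.length_range] at hka
        have hkP : k < P.length := hka
        by_cases hkC : k < C.length
        · rw [List.getElem_append_left (by simp; omega)]
          have hnle := Nat.not_le.mpr hkC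
          by_cases hpt : pt = true <;>
          · by_cases heq : P[k] = C[k] <;>
              simp [hpt, List.getElem_zip, PySem.List.pyGetD_natCast, List.getD_eq_getElem?_getD,
                hkP, hkC, heq, hnle]
        · rw [List.getElem_append_right (by simp; omega)]
          simp [PySem.List.pyGetD_natCast, hkC, hkP]
    | true =>
      have hpt : pt = true := by
        rcases hpt2 : pt
        · exact absurd (hpre hho hpt2) (by omega)
        · rfl
      subst hpt
      have hne : ¬ ((true : Bool) = false) := by decide
      rw [if_neg hne, PySem.List.slice_natCast]
      apply List.ext_getElem
      · simp; omega
      · intro k hka hkb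
        simp only [List.length_map, List.length_range] at hka
        have hkP : k < P.length := hka
        by_cases hkC : k < C.length
        · rw [List.getElem_append_left (by simp; omega)]
          simp [List.getElem_zip, PySem.List.pyGetD_natCast, List.getD_eq_getElem?_getD, hkP, hkC]
        · rw [List.getElem_append_right (by simp; omega)]
          simp only [List.getElem_take, List.getElem_drop]
          have hnle := Nat.not_lt.mp hkC
          simp [PySem.List.pyGetD_natCast, hkC, hkP, List.getD_eq_getElem?_getD,
            Nat.min_eq_right hmn.le, Nat.add_sub_cancel' hnle]

-- ===== VERDICT (by name: the statement is the Claim_ definition above) =====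
theorem hide_ok_nok_spec : Claim_equal_hide_ok_nok := by
  intro x pt hide_ok _ hpre
  obtain ⟨_, _, hlen⟩ := hpre
  unfold Spec_hide_ok_nok hide_ok_nok hide_ok_nok_alt
  simp only []
  set P := ((List.lookup "pt" x).getD "").toList with hP
  set C := ((List.lookup "c" x).getD "").toList with hC
  have hlen' : hide_ok = true → pt = false → P.length ≤ C.length := by
    intro h1 h2
    have := hlen h1 h2
    simpa [hP, hC] using this
  have hfused := fused_eq_alt P C pt hide_ok hlen'
  have hA : (if hide_ok then
      String.ofList ((PySem.List.pyRange 0 P.length 1).map (fun i =>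
        if PySem.Set.contains (PySem.Set.ofList
          (((PySem.List.enumerate (P.zip C) 0).filter
              (fun p => Nat.xor p.2.1.toNat p.2.2.toNat == 0)).map (·.1))) i then '.'
        else PySem.List.pyGetD (if pt then P else C) i ' '))
    else
      String.ofList ((PySem.List.pyRange 0 P.length 1).map (fun i =>
        if ¬ PySem.Set.contains (PySem.Set.ofList
          (((PySem.List.enumerate (P.zip C) 0).filter
              (fun p => Nat.xor p.2.1.toNat p.2.2.toNat == 0)).map (·.1))) i then '.'
        else PySem.List.pyGetD (if pt then P else C) i ' ')))
      = String.ofList ((PySem.List.pyRange 0 P.length 1).map (fun i =>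
        if (decide (i < (C.length : Int)) && (PySem.List.pyGetD P i ' ' == PySem.List.pyGetD C i ' ')) == hide_ok
        then '.' else PySem.List.pyGetD (if pt then P else C) i ' ')) := by
    cases hide_ok <;>
    · refine congrArg String.ofList (List.map_congr_left ?_)
      intro i hi
      rw [PySem.List.mem_pyRange_one] at hi
      rw [contains_ok _ _ i hi.1 hi.2]
      set m := (decide (i < ((C.length : Nat) : Int)) &&
          (PySem.List.pyGetD P i ' ' == PySem.List.pyGetD C i ' ')) with hm
      cases m <;> simp
  rw [hA, hfused]
  simp only []
  by_cases h1 : (P.length : Int) - (C.length : Int) ≤ 0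
  · rw [if_pos h1, if_pos h1]
  · rw [if_neg h1, if_neg h1]
    cases hide_ok <;> simp
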